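-- pv_equiv track=rewrite | github.com/senicko/wdi-kolos-2 | 166.py | solve
-- ===== SOURCE A (Python) =====
-- def solve(shards_a, shards_b):
--     len_a = len(shards_a)
--     len_b = len(shards_b)
--
--     used_a = [0 for _ in range(len(shards_a))]
--     used_b = [0 for _ in range(len(shards_b))]
--
--     def rec(word_a="", word_b=""):
--         if min(used_a) == 1 and min(used_b) == 1:
--             return word_a == word_b
--
--         possible = False
--
--         for i in range(len_a):
--             if used_a[i] == 0:
--                 used_a[i] = 1
--                 possible = possible or rec(word_a + shards_a[i], word_b)
--                 used_a[i] = 0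
--
--         for i in range(len_b):
--             if used_b[i] == 0:
--                 used_b[i] = 1
--                 possible = possible or rec(word_a, word_b + shards_b[i])
--                 used_b[i] = 0
--
--         return possible
--
--     return rec()
-- ===== SOURCE B (Python) =====
-- def solve(shards_a, shards_b):
--     # Build, per side, the set of all strings obtainable by concatenating the
--     # shards in some order, then test whether the two sets intersect.
--     def joins(rem):
--         if not rem:
--             return {""}
--         out = set()
--         for i in range(len(rem)):
--             head = rem[i]
--             for tail in joins(rem[:i] + rem[i + 1:]):
--                 out.add(head + tail)
--         return out
--
--     words_b = joins(shards_b)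
--     return any(w in words_b for w in joins(shards_a))
-- ===== Notes on version B (the rewrite author's own statement) =====
-- stated objective: faster
-- what changed: A explores every interleaving of the two sides with mutable used-flags (factorial in len(a)+len(b)); B computes, per side independently, the set of all concatenations of that side's shards and tests whether the two sets intersect.
import Mathlib
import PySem

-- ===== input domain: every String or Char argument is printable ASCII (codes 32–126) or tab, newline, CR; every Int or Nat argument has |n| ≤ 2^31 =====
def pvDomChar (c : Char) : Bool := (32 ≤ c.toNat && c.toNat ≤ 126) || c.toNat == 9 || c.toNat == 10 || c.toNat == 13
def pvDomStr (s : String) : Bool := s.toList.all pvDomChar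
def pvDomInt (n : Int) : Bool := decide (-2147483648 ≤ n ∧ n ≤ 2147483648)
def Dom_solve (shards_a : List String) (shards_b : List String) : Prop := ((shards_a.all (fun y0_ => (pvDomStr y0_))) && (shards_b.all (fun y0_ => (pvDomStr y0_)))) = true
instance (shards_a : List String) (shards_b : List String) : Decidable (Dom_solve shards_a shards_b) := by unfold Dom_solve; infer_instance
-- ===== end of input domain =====

-- B replaces A's search over all interleavings of the two sides by two independent
-- per-side sets of full concatenations and a set-intersection test (faster).

-- ===== PORT A =====
-- Literal port of A's `rec`: mutable used-flag lists become explicit list arguments;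
-- the fuel counter only makes the recursion total (the fuel `solve` passes always
-- suffices). Loop indices come from `range`, so they are in bounds and `getD` is
-- exact for Python's `used[i]` / `shards[i]`.
def solveRec (fuel : Nat) (shards_a shards_b : List String)
    (used_a used_b : List Int) (word_a word_b : String) : Bool :=
  match fuel with
  | 0 => false
  | fuel + 1 =>
    if PySem.List.min? used_a (fun x => x) == some 1 &&
       PySem.List.min? used_b (fun x => x) == some 1 then
      word_a == word_b
    else
      let p1 := (List.range shards_a.length).foldl
        (fun possible i =>
          if used_a.getD i 1 == 0 then
            possible || solveRec fuel shards_a shards_b (used_a.set i 1) used_b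
              (word_a ++ shards_a.getD i "") word_b
          else possible) false
      (List.range shards_b.length).foldl
        (fun possible i =>
          if used_b.getD i 1 == 0 then
            possible || solveRec fuel shards_a shards_b used_a (used_b.set i 1)
              word_a (word_b ++ shards_b.getD i "")
          else possible) p1

def solve (shards_a : List String) (shards_b : List String) : Bool :=
  solveRec (shards_a.length + shards_b.length + 1) shards_a shards_b
    (List.replicate shards_a.length 0) (List.replicate shards_b.length 0) "" ""

-- ===== PORT B =====
-- Literal port of Source B's `joins`: the set of all concatenations of the shards in
-- some order; `rem[:i] + rem[i+1:]` is `rem.take i ++ rem.drop (i+1)`. The fuel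
-- counter only makes the recursion total (rem.length + 1 always suffices).
def joinsRec (fuel : Nat) (rem : List String) : PySem.Set String :=
  match fuel with
  | 0 => PySem.Set.empty
  | fuel + 1 =>
    if rem = [] then PySem.Set.ofList [""]
    else (List.range rem.length).foldl
      (fun out i =>
        (joinsRec fuel (rem.take i ++ rem.drop (i + 1))).foldl
          (fun out2 t => PySem.Set.add out2 (rem.getD i "" ++ t)) out)
      PySem.Set.empty

def joins (rem : List String) : PySem.Set String := joinsRec (rem.length + 1) rem

def solve_alt (shards_a : List String) (shards_b : List String) : Bool :=
  let words_b := joins shards_b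
  (joins shards_a).any (fun w => PySem.Set.contains words_b w)

-- ===== PRECONDITION & SPEC =====
-- Pre_ excludes exactly the inputs where A raises: an empty shard list makes
-- Python's min(used) raise ValueError before anything else happens.
def Pre_solve (shards_a : List String) (shards_b : List String) : Prop :=
  shards_a ≠ [] ∧ shards_b ≠ []
instance (shards_a : List String) (shards_b : List String) : Decidable (Pre_solve shards_a shards_b) := by unfold Pre_solve; infer_instance

def pvWitness_solve : List String × List String := (["ab"], ["a", "b"])

def Spec_solve (shards_a : List String) (shards_b : List String) (out : Bool) : Prop := out = solve_alt shards_a shards_b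
instance (shards_a : List String) (shards_b : List String) (out : Bool) : Decidable (Spec_solve shards_a shards_b out) := by unfold Spec_solve; infer_instance

-- ===== CLAIM (what is proved, stated in full; the proofs are below) =====
def Claim_equal_solve : Prop := ∀ (shards_a : List String) (shards_b : List String), Dom_solve shards_a shards_b → Pre_solve shards_a shards_b → Spec_solve shards_a shards_b (solve shards_a shards_b)

-- ===== LEMMAS AND PROOFS =====

-- The shards whose flag is still 0 (in order).
def remF : List String → List Int → List String
  | x :: xs, f :: fs => if f = 0 then x :: remF xs fs else remF xs fs
  | _, _ => []

theorem remF_replicate (xs : List String) :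
    remF xs (List.replicate xs.length 0) = xs := by
  induction xs with
  | nil => rfl
  | cons x xs ih => simp [remF, List.replicate_succ, ih]

theorem length_remF : ∀ (xs : List String) (fs : List Int),
    xs.length = fs.length → (remF xs fs).length = fs.count 0 := by
  intro xs
  induction xs with
  | nil =>
    intro fs h
    cases fs with
    | nil => rfl
    | cons f fs => simp at h
  | cons x xs ih =>
    intro fs h
    cases fs with
    | nil => simp at h
    | cons f fs =>
      have h' : xs.length = fs.length := by simpa using h
      by_cases hf : f = 0
      · simp [remF, hf, ih fs h']
      · simp [remF, hf, ih fs h']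

theorem remF_set : ∀ (i : Nat) (xs : List String) (fs : List Int),
    xs.length = fs.length → i < fs.length → fs.getD i 1 = 0 →
    remF xs (fs.set i 1) = (remF xs fs).eraseIdx ((fs.take i).count 0) ∧
    (remF xs fs).getD ((fs.take i).count 0) "" = xs.getD i "" := by
  intro i
  induction i with
  | zero =>
    intro xs fs h hlt h0
    cases fs with
    | nil => simp at hlt
    | cons f fs =>
      cases xs with
      | nil => simp at h
      | cons x xs =>
        have hf : f = 0 := by simpa using h0
        subst hf
        simp [remF]
  | succ i ih =>
    intro xs fs h hlt h0
    cases fs with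
    | nil => simp at hlt
    | cons f fs =>
      cases xs with
      | nil => simp at h
      | cons x xs =>
        have h' : xs.length = fs.length := by simpa using h
        have hlt' : i < fs.length := by simpa using hlt
        have h0' : fs.getD i 1 = 0 := by simpa using h0
        obtain ⟨e1, e2⟩ := ih xs fs h' hlt' h0'
        by_cases hf : f = 0
        · subst hf
          refine ⟨?_, ?_⟩
          · simp [remF, e1, List.eraseIdx_cons_succ]
          · simp only [remF]
            simp
            simpa using e2
        · refine ⟨?_, ?_⟩
          · simp [remF, hf, e1]
          · simp only [remF, if_neg hf]
            simp [hf]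
            simpa using e2

theorem remF_surj : ∀ (fs : List Int) (k : Nat), k < fs.count 0 →
    ∃ i, i < fs.length ∧ fs.getD i 1 = 0 ∧ (fs.take i).count 0 = k := by
  intro fs
  induction fs with
  | nil => intro k hk; simp at hk
  | cons f fs ih =>
    intro k hk
    by_cases hf : f = 0
    · cases k with
      | zero => exact ⟨0, by simp, by simpa using hf, by simp⟩
      | succ k =>
        have hk' : k < fs.count 0 := by
          simp [hf] at hk; omega
        obtain ⟨i, h1, h2, h3⟩ := ih k hk'
        exact ⟨i + 1, by simpa using h1, by simpa using h2,
          by simp [hf, h3]⟩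
    · have hk' : k < fs.count 0 := by
        simp only [List.count_cons] at hk
        simpa [hf] using hk
      obtain ⟨i, h1, h2, h3⟩ := ih k hk'
      exact ⟨i + 1, by simpa using h1, by simpa using h2,
        by simp [hf, h3]⟩

theorem count_set_zero : ∀ (i : Nat) (fs : List Int), i < fs.length → fs.getD i 1 = 0 →
    (fs.set i 1).count 0 + 1 = fs.count 0 := by
  intro i
  induction i with
  | zero =>
    intro fs hlt h0
    cases fs with
    | nil => simp at hlt
    | cons f fs =>
      have hf : f = 0 := by simpa using h0
      subst hf
      simp
  | succ i ih =>
    intro fs hlt h0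
    cases fs with
    | nil => simp at hlt
    | cons f fs =>
      have := ih fs (by simpa using hlt) (by simpa using h0)
      simp only [List.set_cons_succ, List.count_cons]
      omega

theorem take_count_lt : ∀ (i : Nat) (fs : List Int), i < fs.length → fs.getD i 1 = 0 →
    (fs.take i).count 0 < fs.count 0 := by
  intro i fs hlt h0
  have hsplit : fs.count 0 = (fs.take i).count 0 + (fs.drop i).count 0 := by
    rw [← List.count_append, List.take_append_drop]
  have hget : fs[i] = 0 := by rwa [List.getD_eq_getElem fs 1 hlt] at h0
  have hdrop : List.drop i fs = (0 : Int) :: List.drop (i + 1) fs := by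
    rw [List.drop_eq_getElem_cons hlt, hget]
  rw [hdrop, List.count_cons] at hsplit
  simp at hsplit
  omega

theorem minFlag (fs : List Int) (hne : fs ≠ []) (h01 : ∀ f ∈ fs, f = 0 ∨ f = 1) :
    ((PySem.List.min? fs (fun x => x) == some 1) = true ↔ fs.count 0 = 0) := by
  cases hm : PySem.List.min? fs (fun x => x) with
  | none => exact absurd ((PySem.List.min?_eq_none_iff fs _).mp hm) hne
  | some m =>
    have hmem := PySem.List.min?_mem hm
    have hmin := PySem.List.min?_isMin hm
    constructor
    · intro h
      have hm1 : m = 1 := by simpa using h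
      rw [List.count_eq_zero]
      intro h0
      have := hmin 0 h0
      simp [hm1] at this
    · intro hc
      have h0 : (0 : Int) ∉ fs := List.count_eq_zero.mp hc
      rcases h01 m hmem with h | h
      · exact absurd (h ▸ hmem) h0
      · simp [h]

theorem foldl_or_if {ι : Type} (l : List ι) (c : ι → Bool) (f : ι → Bool) :
    ∀ b : Bool, l.foldl (fun p i => if c i then p || f i else p) b
      = (b || l.any fun i => c i && f i) := by
  induction l with
  | nil => intro b; simp
  | cons x xs ih =>
    intro b
    simp only [List.foldl_cons, List.any_cons, ih]
    cases hc : c x <;> cases b <;> cases hf : f x <;> simp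

theorem mem_foldl_add (ts : List String) (g : String → String) :
    ∀ (s0 : PySem.Set String) (x : String),
    (x ∈ ts.foldl (fun o t => PySem.Set.add o (g t)) s0 ↔ x ∈ s0 ∨ ∃ t ∈ ts, x = g t) := by
  induction ts with
  | nil => intro s0 x; simp
  | cons t ts ih =>
    intro s0 x
    simp only [List.foldl_cons, ih, PySem.Set.mem_add, List.mem_cons]
    constructor
    · rintro ((h | h) | ⟨u, hu, hx⟩)
      · exact Or.inl h
      · exact Or.inr ⟨t, Or.inl rfl, h⟩
      · exact Or.inr ⟨u, Or.inr hu, hx⟩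
    · rintro (h | ⟨u, (rfl | hu), hx⟩)
      · exact Or.inl (Or.inl h)
      · exact Or.inl (Or.inr hx)
      · exact Or.inr ⟨u, hu, hx⟩

theorem mem_foldl_addmap (l : List Nat) (S : Nat → List String) (h : Nat → String) :
    ∀ (s0 : PySem.Set String) (x : String),
    (x ∈ l.foldl (fun out i => (S i).foldl (fun out2 t => PySem.Set.add out2 (h i ++ t)) out) s0 ↔
      x ∈ s0 ∨ ∃ i ∈ l, ∃ t ∈ S i, x = h i ++ t) := by
  induction l with
  | nil => intro s0 x; simp
  | cons j l ih =>
    intro s0 x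
    simp only [List.foldl_cons, ih, List.mem_cons]
    rw [mem_foldl_add]
    constructor
    · rintro ((hx | ⟨t, ht, hx⟩) | ⟨i, hi, t, ht, hx⟩)
      · exact Or.inl hx
      · exact Or.inr ⟨j, Or.inl rfl, t, ht, hx⟩
      · exact Or.inr ⟨i, Or.inr hi, t, ht, hx⟩
    · rintro (hx | ⟨i, (rfl | hi), t, ht, hx⟩)
      · exact Or.inl (Or.inl hx)
      · exact Or.inl (Or.inr ⟨t, ht, hx⟩)
      · exact Or.inr ⟨i, hi, t, ht, hx⟩

theorem joinsRec_congr : ∀ (f1 f2 : Nat) (rem : List String),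
    rem.length < f1 → rem.length < f2 → joinsRec f1 rem = joinsRec f2 rem := by
  intro f1
  induction f1 with
  | zero => intro f2 rem h1 h2; omega
  | succ f1 ih =>
    intro f2 rem h1 h2
    cases f2 with
    | zero => omega
    | succ f2 =>
      simp only [joinsRec]
      by_cases hnil : rem = []
      · simp [hnil]
      · simp only [if_neg hnil]
        have hlen : 1 ≤ rem.length := by
          cases rem with
          | nil => exact absurd rfl hnil
          | cons a l => simp
        apply PySem.List.foldl_congr_mem
        intro acc i hi
        have hi' : i < rem.length := List.mem_range.mp hi
        have he : (rem.take i ++ rem.drop (i + 1)).length = rem.length - 1 := by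
          simp; omega
        rw [ih f2 (rem.take i ++ rem.drop (i + 1)) (by omega) (by omega)]

theorem mem_joins (rem : List String) (s : String) :
    s ∈ joins rem ↔ (rem = [] ∧ s = "") ∨
      ∃ i, i < rem.length ∧
        ∃ t ∈ joins (rem.take i ++ rem.drop (i + 1)), s = rem.getD i "" ++ t := by
  by_cases hnil : rem = []
  · subst hnil
    simp [joins, joinsRec, PySem.Set.mem_ofList]
  · have hlen : 1 ≤ rem.length := by
      cases rem with
      | nil => exact absurd rfl hnil
      | cons a l => simp
    have hunfold : joins rem = (List.range rem.length).foldl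
        (fun out i =>
          (joinsRec rem.length (rem.take i ++ rem.drop (i + 1))).foldl
            (fun out2 t => PySem.Set.add out2 (rem.getD i "" ++ t)) out)
        PySem.Set.empty := by
      simp only [joins, joinsRec, if_neg hnil]
    rw [hunfold]
    refine Iff.trans (mem_foldl_addmap (List.range rem.length)
      (fun i => joinsRec rem.length (rem.take i ++ rem.drop (i + 1)))
      (fun i => rem.getD i "") _ s) ?_
    have hj : ∀ i, i < rem.length →
        joinsRec rem.length (rem.take i ++ rem.drop (i + 1))
          = joins (rem.take i ++ rem.drop (i + 1)) := by
      intro i hi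
      have he : (rem.take i ++ rem.drop (i + 1)).length = rem.length - 1 := by
        simp; omega
      have : joinsRec rem.length (rem.take i ++ rem.drop (i + 1))
          = joinsRec ((rem.take i ++ rem.drop (i + 1)).length + 1)
              (rem.take i ++ rem.drop (i + 1)) :=
        joinsRec_congr _ _ _ (by rw [he]; omega) (by omega)
      rw [this]; rfl
    constructor
    · rintro (hx | ⟨i, hi, t, ht, hx⟩)
      · exact absurd hx (by simp [PySem.Set.empty])
      · have hi' := List.mem_range.mp hi
        exact Or.inr ⟨i, hi', t, by rwa [hj i hi'] at ht, hx⟩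
    · rintro (⟨h, _⟩ | ⟨i, hi, t, ht, hx⟩)
      · exact absurd h hnil
      · exact Or.inr ⟨i, List.mem_range.mpr hi, t, by rwa [hj i hi], hx⟩

theorem flags_set (fs : List Int) (i : Nat) (h01 : ∀ f ∈ fs, f = 0 ∨ f = 1) :
    ∀ f ∈ fs.set i 1, f = 0 ∨ f = 1 := by
  intro f hf
  rcases List.mem_or_eq_of_mem_set hf with h | h
  · exact h01 f h
  · right; exact h

theorem solveRec_iff : ∀ (fuel : Nat) (sa sb : List String) (ua ub : List Int) (wa wb : String),
    ua.length = sa.length → ub.length = sb.length →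
    (∀ f ∈ ua, f = 0 ∨ f = 1) → (∀ f ∈ ub, f = 0 ∨ f = 1) →
    sa ≠ [] → sb ≠ [] →
    ua.count 0 + ub.count 0 < fuel →
    (solveRec fuel sa sb ua ub wa wb = true ↔
      ∃ ta ∈ joins (remF sa ua), ∃ tb ∈ joins (remF sb ub), wa ++ ta = wb ++ tb) := by
  intro fuel
  induction fuel with
  | zero => intro sa sb ua ub wa wb _ _ _ _ _ _ hfuel; omega
  | succ fuel ih =>
    intro sa sb ua ub wa wb ha hb f01a f01b hna hnb hfuel
    have hua_ne : ua ≠ [] := by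
      intro h; subst h
      exact hna (List.length_eq_zero_iff.mp (by simpa using ha.symm))
    have hub_ne : ub ≠ [] := by
      intro h; subst h
      exact hnb (List.length_eq_zero_iff.mp (by simpa using hb.symm))
    simp only [solveRec]
    by_cases hbase : ua.count 0 = 0 ∧ ub.count 0 = 0
    · have hca := (minFlag ua hua_ne f01a).mpr hbase.1
      have hcb := (minFlag ub hub_ne f01b).mpr hbase.2
      rw [if_pos (by rw [Bool.and_eq_true]; exact ⟨hca, hcb⟩)]
      have hra : remF sa ua = [] := by
        rw [← List.length_eq_zero_iff, length_remF sa ua ha.symm]; exact hbase.1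
      have hrb : remF sb ub = [] := by
        rw [← List.length_eq_zero_iff, length_remF sb ub hb.symm]; exact hbase.2
      rw [hra, hrb]
      simp [joins, joinsRec, PySem.Set.mem_ofList, beq_iff_eq, String.append_empty]
    · have hcond : ¬((PySem.List.min? ua (fun x => x) == some 1 &&
          PySem.List.min? ub (fun x => x) == some 1) = true) := by
        rw [Bool.and_eq_true]
        rintro ⟨h1, h2⟩
        exact hbase ⟨(minFlag ua hua_ne f01a).mp h1, (minFlag ub hub_ne f01b).mp h2⟩
      rw [if_neg hcond]
      rw [foldl_or_if (List.range sb.length)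
            (fun i => ub.getD i 1 == 0)
            (fun i => solveRec fuel sa sb ua (ub.set i 1) wa (wb ++ sb.getD i "")),
          foldl_or_if (List.range sa.length)
            (fun i => ua.getD i 1 == 0)
            (fun i => solveRec fuel sa sb (ua.set i 1) ub (wa ++ sa.getD i "") wb)]
      simp only [Bool.false_or, Bool.or_eq_true, List.any_eq_true, List.mem_range,
        Bool.and_eq_true, beq_iff_eq]
      constructor
      · rintro (⟨i, hi, hflag, hrec⟩ | ⟨i, hi, hflag, hrec⟩)
        · -- first loop: an unused a-shard was appended
          have hia : i < ua.length := by rw [ha]; exact hi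
          obtain ⟨herase, hgetD⟩ := remF_set i sa ua ha.symm hia hflag
          have hcnt := count_set_zero i ua hia hflag
          have hklt := take_count_lt i ua hia hflag
          have hrec' := (ih sa sb (ua.set i 1) ub (wa ++ sa.getD i "") wb
              (by rw [List.length_set]; exact ha) hb (flags_set ua i f01a) f01b
              hna hnb (by omega)).mp hrec
          obtain ⟨ta', hta', tb, htb, heq⟩ := hrec'
          refine ⟨sa.getD i "" ++ ta', ?_, tb, htb,
            by rw [← String.append_assoc]; exact heq⟩
          rw [mem_joins]
          right
          refine ⟨(ua.take i).count 0, ?_, ta', ?_, ?_⟩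
          · rw [length_remF sa ua ha.symm]; exact hklt
          · rw [herase, List.eraseIdx_eq_take_drop_succ] at hta'
            exact hta'
          · rw [hgetD]
        · -- second loop: an unused b-shard was appended
          have hib : i < ub.length := by rw [hb]; exact hi
          obtain ⟨herase, hgetD⟩ := remF_set i sb ub hb.symm hib hflag
          have hcnt := count_set_zero i ub hib hflag
          have hklt := take_count_lt i ub hib hflag
          have hrec' := (ih sa sb ua (ub.set i 1) wa (wb ++ sb.getD i "")
              ha (by rw [List.length_set]; exact hb) f01a (flags_set ub i f01b)
              hna hnb (by omega)).mp hrec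
          obtain ⟨ta, hta, tb', htb', heq⟩ := hrec'
          refine ⟨ta, hta, sb.getD i "" ++ tb', ?_,
            by rw [← String.append_assoc]; exact heq⟩
          rw [mem_joins]
          right
          refine ⟨(ub.take i).count 0, ?_, tb', ?_, ?_⟩
          · rw [length_remF sb ub hb.symm]; exact hklt
          · rw [herase, List.eraseIdx_eq_take_drop_succ] at htb'
            exact htb'
          · rw [hgetD]
      · rintro ⟨ta, hta, tb, htb, heq⟩
        by_cases hA0 : ua.count 0 = 0
        · -- a-side exhausted: decompose tb, use the second loop
          have hB0 : ub.count 0 ≠ 0 := fun h => hbase ⟨hA0, h⟩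
          rcases (mem_joins _ _).mp htb with ⟨h1, _⟩ | ⟨k, hk, t', ht', htbeq⟩
          · exfalso
            apply hB0
            have hl := length_remF sb ub hb.symm
            rw [h1] at hl
            simpa using hl.symm
          · rw [length_remF sb ub hb.symm] at hk
            obtain ⟨i, hi, hflag, hkeq⟩ := remF_surj ub k hk
            obtain ⟨herase, hgetD⟩ := remF_set i sb ub hb.symm hi hflag
            have hgd : (remF sb ub).getD k "" = sb.getD i "" := by
              rw [← hkeq]; exact hgetD
            have hcnt := count_set_zero i ub hi hflag
            refine Or.inr ⟨i, by rw [← hb]; exact hi, hflag, ?_⟩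
            apply (ih sa sb ua (ub.set i 1) wa (wb ++ sb.getD i "")
              ha (by rw [List.length_set]; exact hb) f01a (flags_set ub i f01b)
              hna hnb (by omega)).mpr
            refine ⟨ta, hta, t', ?_, ?_⟩
            · rw [herase, hkeq, List.eraseIdx_eq_take_drop_succ]
              exact ht'
            · rw [String.append_assoc, ← hgd, ← htbeq]
              exact heq
        · -- an a-shard is still unused: decompose ta, use the first loop
          rcases (mem_joins _ _).mp hta with ⟨h1, _⟩ | ⟨k, hk, t', ht', htaeq⟩
          · exfalso
            apply hA0
            have hl := length_remF sa ua ha.symm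
            rw [h1] at hl
            simpa using hl.symm
          · rw [length_remF sa ua ha.symm] at hk
            obtain ⟨i, hi, hflag, hkeq⟩ := remF_surj ua k hk
            obtain ⟨herase, hgetD⟩ := remF_set i sa ua ha.symm hi hflag
            have hgd : (remF sa ua).getD k "" = sa.getD i "" := by
              rw [← hkeq]; exact hgetD
            have hcnt := count_set_zero i ua hi hflag
            refine Or.inl ⟨i, by rw [← ha]; exact hi, hflag, ?_⟩
            apply (ih sa sb (ua.set i 1) ub (wa ++ sa.getD i "") wb
              (by rw [List.length_set]; exact ha) hb (flags_set ua i f01a) f01b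
              hna hnb (by omega)).mpr
            refine ⟨t', ?_, tb, htb, ?_⟩
            · rw [herase, hkeq, List.eraseIdx_eq_take_drop_succ]
              exact ht'
            · rw [String.append_assoc, ← hgd, ← htaeq]
              exact heq

-- ===== VERDICT (by name: the statement is the Claim_ definition above) =====
theorem solve_spec : Claim_equal_solve := by
  unfold Claim_equal_solve Spec_solve
  intro sa sb _ hpre
  obtain ⟨hna, hnb⟩ := hpre
  have h := solveRec_iff (sa.length + sb.length + 1) sa sb
      (List.replicate sa.length 0) (List.replicate sb.length 0) "" ""
      (by simp) (by simp)
      (fun f hf => Or.inl (List.eq_of_mem_replicate hf))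
      (fun f hf => Or.inl (List.eq_of_mem_replicate hf))
      hna hnb
      (by rw [List.count_replicate_self, List.count_replicate_self]; omega)
  rw [remF_replicate, remF_replicate] at h
  have h2 : (solve_alt sa sb = true) ↔ ∃ s ∈ joins sa, s ∈ joins sb := by
    simp only [solve_alt, List.any_eq_true]
    constructor
    · rintro ⟨w, hw, hc⟩; exact ⟨w, hw, (PySem.Set.contains_iff _ _).mp hc⟩
    · rintro ⟨w, hw, hc⟩; exact ⟨w, hw, (PySem.Set.contains_iff _ _).mpr hc⟩
  rw [Bool.eq_iff_iff]
  rw [show solve sa sb = solveRec (sa.length + sb.length + 1) sa sb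
      (List.replicate sa.length 0) (List.replicate sb.length 0) "" "" from rfl]
  rw [h, h2]
  constructor
  · rintro ⟨ta, hta, tb, htb, heq⟩
    have hteq : ta = tb := by rwa [String.empty_append, String.empty_append] at heq
    exact ⟨ta, hta, hteq ▸ htb⟩
  · rintro ⟨s, h1, h2'⟩
    exact ⟨s, h1, s, h2', rfl⟩
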